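-- pv_equiv track=rewrite | github.com/AstroAir/code-extractor | src/pysearch/fuzzy.py | _generate_soundex_pattern
-- ===== SOURCE A (Python) =====
-- def soundex(s: str) -> str:
--     """
--     Generate Soundex code for phonetic matching.
--     Useful for matching words that sound similar.
--     """
--     if not s:
--         return "0000"
--
--     s = s.upper()
--     soundex_code = s[0]
--
--     # Mapping of letters to numbers
--     mapping = {
--         "B": "1",
--         "F": "1",
--         "P": "1",
--         "V": "1",
--         "C": "2",
--         "G": "2",
--         "J": "2",
--         "K": "2",
--         "Q": "2",
--         "S": "2",
--         "X": "2",
--         "Z": "2",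
--         "D": "3",
--         "T": "3",
--         "L": "4",
--         "M": "5",
--         "N": "5",
--         "R": "6",
--     }
--
--     for char in s[1:]:
--         if char in mapping:
--             code = mapping[char]
--             if code != soundex_code[-1]:  # Avoid consecutive duplicates
--                 soundex_code += code
--         # Vowels and other letters are ignored
--
--     # Pad with zeros or truncate to 4 characters
--     soundex_code = (soundex_code + "000")[:4]
--     return soundex_code
--
-- def _generate_soundex_pattern(pattern: str) -> str:
--     """Generate regex pattern for Soundex-based matching."""
--     soundex_code = soundex(pattern)
--
--     # Create pattern that matches words with same Soundex code
--     # This is a simplified approach - in practice, you'd pre-compute Soundex codes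
--     first_char = pattern[0].lower() if pattern else ""
--
--     # Pattern that starts with same letter and has similar consonant structure
--     consonant_groups = {
--         "1": "[bfpv]",
--         "2": "[cgjkqsxz]",
--         "3": "[dt]",
--         "4": "[l]",
--         "5": "[mn]",
--         "6": "[r]",
--     }
--
--     pattern_parts = [f"[{first_char.upper()}{first_char.lower()}]"]
--     for code in soundex_code[1:]:
--         if code in consonant_groups:
--             pattern_parts.append(f"{consonant_groups[code]}*")
--         elif code == "0":
--             pattern_parts.append("[aeiou]*")
--
--     return "".join(pattern_parts)
-- ===== SOURCE B (Python) =====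
-- _DIGITS = {
--     "B": "1", "F": "1", "P": "1", "V": "1",
--     "C": "2", "G": "2", "J": "2", "K": "2", "Q": "2", "S": "2", "X": "2", "Z": "2",
--     "D": "3", "T": "3",
--     "L": "4", "M": "5", "N": "5",
--     "R": "6",
-- }
--
-- _GROUPS = {
--     "1": "[bfpv]",
--     "2": "[cgjkqsxz]",
--     "3": "[dt]",
--     "4": "[l]",
--     "5": "[mn]",
--     "6": "[r]",
-- }
--
--
-- def _generate_soundex_pattern(pattern: str) -> str:
--     """Single pass over the word: emit consonant groups directly, then pad
--     with [aeiou]* — no intermediate Soundex code string is built."""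
--     if not pattern:
--         return "[]" + "[aeiou]*" * 3
--     c0 = pattern[0]
--     parts = [f"[{c0.upper()}{c0.lower()}]"]
--     last = c0.upper()
--     count = 0
--     for ch in pattern[1:].upper():
--         d = _DIGITS.get(ch)
--         if d is not None and d != last:
--             last = d
--             if count < 3:
--                 parts.append(_GROUPS[d] + "*")
--                 count += 1
--     parts.append("[aeiou]*" * (3 - count))
--     return "".join(parts)
-- ===== Notes on version B (the rewrite author's own statement) =====
-- stated objective: alternative
-- what changed: B fuses the soundex computation and the regex-pattern building into a single pass over the word, tracking the last emitted digit and a group count, so the intermediate 4-character soundex code string is never materialized.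
import Mathlib
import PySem

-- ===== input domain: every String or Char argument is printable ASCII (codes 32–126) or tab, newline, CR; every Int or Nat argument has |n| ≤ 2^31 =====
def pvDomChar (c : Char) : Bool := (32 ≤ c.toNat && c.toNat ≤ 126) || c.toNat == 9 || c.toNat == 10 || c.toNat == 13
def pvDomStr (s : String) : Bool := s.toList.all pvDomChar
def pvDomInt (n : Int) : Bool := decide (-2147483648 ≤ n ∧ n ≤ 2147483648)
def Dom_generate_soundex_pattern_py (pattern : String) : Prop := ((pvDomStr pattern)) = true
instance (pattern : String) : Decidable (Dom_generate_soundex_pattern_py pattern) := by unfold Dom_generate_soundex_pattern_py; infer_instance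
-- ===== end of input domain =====

-- B fuses the soundex computation and the pattern building into one pass over the
-- word (no intermediate soundex code string); objective: alternative decomposition.

-- ===== PORT A =====
-- the letter → soundex-digit table of soundex() (shared data table)
def sx_mapping : PySem.Dict Char Char := PySem.Dict.ofList
  [('B','1'),('F','1'),('P','1'),('V','1'),
   ('C','2'),('G','2'),('J','2'),('K','2'),('Q','2'),('S','2'),('X','2'),('Z','2'),
   ('D','3'),('T','3'),('L','4'),('M','5'),('N','5'),('R','6')]

-- the digit → consonant-group table of _generate_soundex_pattern (shared data table)
def sx_groups : PySem.Dict Char (List Char) := PySem.Dict.ofList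
  [('1', "[bfpv]".toList), ('2', "[cgjkqsxz]".toList), ('3', "[dt]".toList),
   ('4', "[l]".toList), ('5', "[mn]".toList), ('6', "[r]".toList)]

-- soundex(s), strings handled as List Char
def soundex_chars (s : List Char) : List Char :=
  if s = [] then ['0','0','0','0']
  else
    let su := PySem.Chars.upper s
    -- soundex_code = s[0]; for char in s[1:]: …
    let code := (PySem.List.slice su (some 1) none).foldl
      (fun acc c =>
        match PySem.Dict.get? sx_mapping c with
        | some d => if d ≠ PySem.List.pyGetD acc (-1) ' ' then acc ++ [d] else acc  -- soundex_code[-1]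
        | none => acc)
      [su.headI]  -- s[0]; su is nonempty here
    -- (soundex_code + "000")[:4]
    PySem.List.slice (code ++ ['0','0','0']) none (some 4)

def generate_soundex_pattern_py (pattern : String) : String :=
  let soundex_code := soundex_chars pattern.toList
  -- first_char = pattern[0].lower() if pattern else ""
  let first_char : List Char :=
    if pattern.toList ≠ [] then [PySem.Chars.lowerChar pattern.toList.headI] else []
  -- pattern_parts = [f"[{first_char.upper()}{first_char.lower()}]"]
  let parts0 : List (List Char) :=
    [['['] ++ PySem.Chars.upper first_char ++ PySem.Chars.lower first_char ++ [']']]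
  -- for code in soundex_code[1:]: …
  let parts := (PySem.List.slice soundex_code (some 1) none).foldl
    (fun ps c =>
      match PySem.Dict.get? sx_groups c with
      | some g => ps ++ [g ++ ['*']]
      | none => if c = '0' then ps ++ ["[aeiou]*".toList] else ps)
    parts0
  String.ofList (PySem.Chars.join [] parts)  -- "".join(pattern_parts)

-- ===== PORT B =====
-- single pass over the word: state = (parts, last emitted digit, number of emitted groups)
def generate_soundex_pattern_py_alt (pattern : String) : String :=
  match pattern.toList with
  | [] => String.ofList ("[]".toList ++ (List.replicate 3 "[aeiou]*".toList).flatten)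
  | c0 :: rest =>
    let parts0 : List (List Char) :=
      [['[', PySem.Chars.upperChar c0, PySem.Chars.lowerChar c0, ']']]
    let st := (PySem.Chars.upper rest).foldl
      (fun (s : List (List Char) × Char × Nat) ch =>
        match PySem.Dict.get? sx_mapping ch with        -- d = _DIGITS.get(ch)
        | some d =>
          if d ≠ s.2.1 then
            if s.2.2 < 3 then
              (s.1 ++ [PySem.Dict.getD sx_groups d [] ++ ['*']], d, s.2.2 + 1)  -- _GROUPS[d] (d is always a key)
            else (s.1, d, s.2.2)
          else s
        | none => s)
      (parts0, PySem.Chars.upperChar c0, 0)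
    -- parts.append("[aeiou]*" * (3 - count)); "".join(parts)
    String.ofList (PySem.Chars.join [] (st.1 ++ [(List.replicate (3 - st.2.2) "[aeiou]*".toList).flatten]))

-- ===== PRECONDITION & SPEC =====
def Spec_generate_soundex_pattern_py (pattern : String) (out : String) : Prop := out = generate_soundex_pattern_py_alt pattern
instance (pattern : String) (out : String) : Decidable (Spec_generate_soundex_pattern_py pattern out) := by unfold Spec_generate_soundex_pattern_py; infer_instance

-- ===== CLAIM (what is proved, stated in full; the proofs are below) =====
def Claim_equal_generate_soundex_pattern_py : Prop := ∀ (pattern : String), Dom_generate_soundex_pattern_py pattern → Spec_generate_soundex_pattern_py pattern (generate_soundex_pattern_py pattern)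

-- ===== LEMMAS AND PROOFS =====

-- the deduplicated digit stream that A's soundex loop appends after the first letter
def sxCollect (last : Char) : List Char → List Char
  | [] => []
  | c :: cs =>
    match PySem.Dict.get? sx_mapping c with
    | none => sxCollect last cs
    | some d => if d = last then sxCollect last cs else d :: sxCollect d cs

-- the parts A's pattern loop appends for one soundex-code character
def sxPartOf (c : Char) : List (List Char) :=
  match PySem.Dict.get? sx_groups c with
  | some g => [g ++ ['*']]
  | none => if c = '0' then ["[aeiou]*".toList] else []

def sxGrp (d : Char) : List Char := PySem.Dict.getD sx_groups d [] ++ ['*']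

lemma join_nil_eq_flatten (t : List (List Char)) : PySem.Chars.join [] t = t.flatten := by
  induction t with
  | nil => rfl
  | cons h t ih =>
    cases t with
    | nil => simp [PySem.Chars.join, List.intercalate]
    | cons h2 t2 =>
      simp only [PySem.Chars.join, List.intercalate] at *
      simp [List.intersperse] at *
      simpa using ih

lemma char_ofNat_toNat (n : Nat) (h : n ≤ 200) : (Char.ofNat n).toNat = n := by
  rw [Char.toNat_ofNat, if_pos (Or.inl (by omega))]

lemma char_le_iff (a b : Char) : a ≤ b ↔ a.toNat ≤ b.toNat := by
  rw [Char.le_def]; exact UInt32.le_iff_toNat_le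

lemma isupper_iff (c : Char) : PySem.Chars.isupper c = true ↔ (65 ≤ c.toNat ∧ c.toNat ≤ 90) := by
  simp [PySem.Chars.isupper, char_le_iff]

lemma islower_iff (c : Char) : PySem.Chars.islower c = true ↔ (97 ≤ c.toNat ∧ c.toNat ≤ 122) := by
  simp [PySem.Chars.islower, char_le_iff]

lemma upperChar_lowerChar (c : Char) :
    PySem.Chars.upperChar (PySem.Chars.lowerChar c) = PySem.Chars.upperChar c := by
  by_cases hu : PySem.Chars.isupper c = true
  · have hn := (isupper_iff c).mp hu
    have h1 : PySem.Chars.lowerChar c = Char.ofNat (c.toNat + 32) := by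
      simp [PySem.Chars.lowerChar, hu]
    have h2 : (Char.ofNat (c.toNat + 32)).toNat = c.toNat + 32 :=
      char_ofNat_toNat _ (by omega)
    have hlow : PySem.Chars.islower (Char.ofNat (c.toNat + 32)) = true :=
      (islower_iff _).mpr (by omega)
    have hnl : PySem.Chars.islower c = false := by
      rw [← Bool.not_eq_true, islower_iff]; omega
    rw [h1]
    simp only [PySem.Chars.upperChar, hlow, hnl, if_true, Bool.false_eq_true, if_false, h2]
    have h32 : c.toNat + 32 - 32 = c.toNat := by omega
    rw [h32, Char.ofNat_toNat]
  · have h1 : PySem.Chars.lowerChar c = c := by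
      simp [PySem.Chars.lowerChar, hu]
    rw [h1]

lemma lowerChar_lowerChar (c : Char) :
    PySem.Chars.lowerChar (PySem.Chars.lowerChar c) = PySem.Chars.lowerChar c := by
  by_cases hu : PySem.Chars.isupper c = true
  · have hn := (isupper_iff c).mp hu
    have h1 : PySem.Chars.lowerChar c = Char.ofNat (c.toNat + 32) := by
      simp [PySem.Chars.lowerChar, hu]
    have h2 : (Char.ofNat (c.toNat + 32)).toNat = c.toNat + 32 :=
      char_ofNat_toNat _ (by omega)
    have hnu : PySem.Chars.isupper (Char.ofNat (c.toNat + 32)) = false := by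
      rw [← Bool.not_eq_true, isupper_iff]; omega
    rw [h1]
    simp [PySem.Chars.lowerChar, hnu]
  · have h1 : PySem.Chars.lowerChar c = c := by
      simp [PySem.Chars.lowerChar, hu]
    rw [h1, h1]

lemma upper_eq_map (cs : List Char) : PySem.Chars.upper cs = cs.map PySem.Chars.upperChar := by
  simp [PySem.Chars.upper]

lemma lower_eq_map (cs : List Char) : PySem.Chars.lower cs = cs.map PySem.Chars.lowerChar := by
  simp [PySem.Chars.lower]

-- every digit soundex's letter table can produce denotes a consonant group
lemma sx_mapping_range (c d : Char) (h : PySem.Dict.get? sx_mapping c = some d) :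
    sxPartOf d = [sxGrp d] := by
  have hm : (c, d) ∈ sx_mapping.items := PySem.Dict.mem_items_of_get?_eq_some _ h
  have hit : sx_mapping.items =
    [('B','1'),('F','1'),('P','1'),('V','1'),
     ('C','2'),('G','2'),('J','2'),('K','2'),('Q','2'),('S','2'),('X','2'),('Z','2'),
     ('D','3'),('T','3'),('L','4'),('M','5'),('N','5'),('R','6')] := by decide
  rw [hit] at hm
  simp [Prod.mk.injEq] at hm
  rcases hm with ⟨_,h⟩|⟨_,h⟩|⟨_,h⟩|⟨_,h⟩|⟨_,h⟩|⟨_,h⟩|⟨_,h⟩|⟨_,h⟩|⟨_,h⟩|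
    ⟨_,h⟩|⟨_,h⟩|⟨_,h⟩|⟨_,h⟩|⟨_,h⟩|⟨_,h⟩|⟨_,h⟩|⟨_,h⟩|⟨_,h⟩ <;> rw [h] <;> decide

lemma afold_eq (cs : List Char) :
    ∀ (acc : List Char) (a : Char),
    cs.foldl (fun acc c =>
        match PySem.Dict.get? sx_mapping c with
        | some d => if d ≠ PySem.List.pyGetD acc (-1) ' ' then acc ++ [d] else acc
        | none => acc) (acc ++ [a])
    = (acc ++ [a]) ++ sxCollect a cs := by
  induction cs with
  | nil => intro acc a; simp [sxCollect]
  | cons c cs ih =>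
    intro acc a
    simp only [List.foldl_cons, sxCollect]
    cases hd : PySem.Dict.get? sx_mapping c with
    | none => simpa [hd] using ih acc a
    | some d =>
      simp only [hd, PySem.List.pyGetD_neg_one_append_singleton acc a ' ']
      by_cases hda : d = a
      · simpa [hda] using ih acc a
      · simp only [hda, ne_eq, not_false_eq_true, if_true, if_neg]
        have := ih (acc ++ [a]) d
        simp [hda, List.append_assoc] at this ⊢
        exact this

lemma pfold_eq (L : List Char) (ps0 : List (List Char)) :
    L.foldl (fun ps c =>
        match PySem.Dict.get? sx_groups c with
        | some g => ps ++ [g ++ ['*']]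
        | none => if c = '0' then ps ++ ["[aeiou]*".toList] else ps) ps0
    = ps0 ++ L.flatMap sxPartOf := by
  induction L generalizing ps0 with
  | nil => simp
  | cons c cs ih =>
    rw [List.foldl_cons, ih, List.flatMap_cons]
    cases hg : PySem.Dict.get? sx_groups c with
    | none =>
      by_cases h0 : c = '0'
      · subst h0; simp [sxPartOf, hg, List.append_assoc]
      · simp [sxPartOf, hg, h0, List.append_assoc]
    | some g => simp [sxPartOf, hg, List.append_assoc]

lemma bfold_eq (cs : List Char) :
    ∀ (parts : List (List Char)) (last : Char) (count : Nat),
    ∃ l', cs.foldl (fun (s : List (List Char) × Char × Nat) ch =>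
        match PySem.Dict.get? sx_mapping ch with
        | some d =>
          if d ≠ s.2.1 then
            if s.2.2 < 3 then
              (s.1 ++ [PySem.Dict.getD sx_groups d [] ++ ['*']], d, s.2.2 + 1)
            else (s.1, d, s.2.2)
          else s
        | none => s) (parts, last, count)
      = (parts ++ ((sxCollect last cs).take (3 - count)).map sxGrp, l',
         count + min (3 - count) (sxCollect last cs).length) := by
  induction cs with
  | nil => intro parts last count; exact ⟨last, by simp [sxCollect]⟩
  | cons c cs ih =>
    intro parts last count
    simp only [List.foldl_cons, sxCollect]
    cases hd : PySem.Dict.get? sx_mapping c with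
    | none => simpa [hd] using ih parts last count
    | some d =>
      simp only [hd]
      by_cases hdl : d = last
      · simpa [hdl] using ih parts last count
      · simp only [hdl, ne_eq, not_false_eq_true, if_true, if_neg]
        by_cases hc : count < 3
        · rw [if_pos hc]
          obtain ⟨l', hl⟩ := ih (parts ++ [PySem.Dict.getD sx_groups d [] ++ ['*']]) d (count + 1)
          refine ⟨l', ?_⟩
          rw [hl]
          have h3 : 3 - count = (3 - (count + 1)) + 1 := by omega
          rw [h3, List.take_succ_cons, List.map_cons]
          simp only [Prod.mk.injEq, List.length_cons]
          refine ⟨by simp [sxGrp, List.append_assoc], trivial, by omega⟩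
        · rw [if_neg hc]
          obtain ⟨l', hl⟩ := ih parts d count
          refine ⟨l', ?_⟩
          rw [hl]
          have h3 : 3 - count = 0 := by omega
          simp [h3]

lemma sxCollect_range (last : Char) (cs : List Char) :
    ∀ d ∈ sxCollect last cs, sxPartOf d = [sxGrp d] := by
  induction cs generalizing last with
  | nil => simp [sxCollect]
  | cons c cs ih =>
    intro d hd
    simp only [sxCollect] at hd
    cases hm : PySem.Dict.get? sx_mapping c with
    | none => exact ih last d (by simpa [hm] using hd)
    | some e =>
      rw [hm] at hd
      by_cases hel : e = last
      · exact ih last d (by simpa [hel] using hd)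
      · simp only [if_neg hel, List.mem_cons] at hd
        rcases hd with rfl | hd
        · exact sx_mapping_range c d hm
        · exact ih e d hd

lemma flatMap_parts (E : List Char) (h : ∀ d ∈ E, sxPartOf d = [sxGrp d]) :
    ((E ++ ['0','0','0']).take 3).flatMap sxPartOf
    = (E.take 3).map sxGrp ++ List.replicate (3 - min 3 E.length) "[aeiou]*".toList := by
  match E with
  | [] => decide
  | [a] =>
    have ha := h a (by simp)
    simp [List.flatMap_cons, ha]
    decide
  | [a, b] =>
    have ha := h a (by simp)
    have hb := h b (by simp)
    simp [List.flatMap_cons, ha, hb]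
    decide
  | a :: b :: c :: rest =>
    have ha := h a (by simp)
    have hb := h b (by simp)
    have hc := h c (by simp)
    simp [List.flatMap_cons, ha, hb, hc]

-- ===== VERDICT (by name: the statement is the Claim_ definition above) =====
theorem generate_soundex_pattern_py_spec : Claim_equal_generate_soundex_pattern_py := by
  intro pattern _
  unfold Spec_generate_soundex_pattern_py
  unfold generate_soundex_pattern_py generate_soundex_pattern_py_alt
  cases hp : pattern.toList with
  | nil => simp [soundex_chars]; decide
  | cons c0 rest =>
    have hsx : soundex_chars (c0 :: rest)
        = PySem.Chars.upperChar c0 ::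
          ((sxCollect (PySem.Chars.upperChar c0) (rest.map PySem.Chars.upperChar)
              ++ ['0','0','0']).take 3) := by
      simp only [soundex_chars, if_neg (by simp : ¬(c0 :: rest = ([] : List Char)))]
      rw [upper_eq_map]
      simp only [List.map_cons, List.headI, PySem.List.slice_from_one, List.tail_cons]
      have ha := afold_eq (rest.map PySem.Chars.upperChar) [] (PySem.Chars.upperChar c0)
      simp only [List.nil_append] at ha
      rw [ha, PySem.List.slice_to _ (by norm_num)]
      simp [List.take_succ_cons]
    obtain ⟨l', hB⟩ := bfold_eq (rest.map PySem.Chars.upperChar)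
        [['[', PySem.Chars.upperChar c0, PySem.Chars.lowerChar c0, ']']]
        (PySem.Chars.upperChar c0) 0
    simp only [hsx, PySem.List.slice_from_one, List.tail_cons, pfold_eq,
      upper_eq_map, lower_eq_map, List.map_cons, List.map_nil,
      upperChar_lowerChar, lowerChar_lowerChar, hB,
      join_nil_eq_flatten, ne_eq, reduceCtorEq, not_false_eq_true, if_true, if_neg]
    rw [flatMap_parts _ (sxCollect_range _ _)]
    simp [List.flatten_append, List.append_assoc]
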